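-- pv_equiv track=rewrite | github.com/MrHamdulay/csc3-capstone | examples/data/Assignment_8/amntas003/question2.py | rep_char
-- ===== SOURCE A (Python) =====
-- def rep_char(message):
--     if len(message) == 1:                               #If there are fewer than 2 characters, there can be no repetition
--             return 0
--     elif len(message) == 2:
--         if message[0] == message[1]:                    #Check if there is a repeated character
--             return 1
--         else:
--             return 0                                    #If no repetition, do not count anything
--     elif message[0] == message[1]:                      #Check to see if there is a repeated pair
--         return 1 + rep_char(message[2:])
--     else:
--         return rep_char(message[1:])
-- ===== SOURCE B (Python) =====
-- def rep_char(message):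
--     count = 0
--     i = 0
--     n = len(message)
--     while i < n - 1:
--         if message[i] == message[i + 1]:
--             count += 1
--             i += 2
--         else:
--             i += 1
--     return count
-- ===== Notes on version B (the rewrite author's own statement) =====
-- stated objective: faster
-- what changed: Replaces A's recursion on string slices (each slice copies the tail, O(n^2)) with a single iterative index-pointer pass accumulating the count in O(n).
import Mathlib
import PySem

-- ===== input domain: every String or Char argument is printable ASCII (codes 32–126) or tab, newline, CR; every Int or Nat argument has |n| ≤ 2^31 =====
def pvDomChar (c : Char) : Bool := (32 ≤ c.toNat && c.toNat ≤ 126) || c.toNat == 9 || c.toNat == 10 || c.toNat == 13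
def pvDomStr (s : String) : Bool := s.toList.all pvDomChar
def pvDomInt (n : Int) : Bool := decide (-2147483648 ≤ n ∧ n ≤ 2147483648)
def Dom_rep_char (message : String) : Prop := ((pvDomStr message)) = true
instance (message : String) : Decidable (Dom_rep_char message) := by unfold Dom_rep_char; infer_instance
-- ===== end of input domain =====

-- ===== PORT A =====
-- B replaces A's O(n^2) recursive slicing with a single O(n) index-pointer pass (equal return value; A raises on "", excluded by Pre_).
-- recursive helper: literal transliteration of A's branch structure on the character list
def repCharA : List Char → Int
  | [] => 0  -- unreachable under Pre_ (Python raises IndexError here)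
  | [_] => 0
  | [a, b] => if a == b then 1 else 0
  | a :: b :: c :: rest =>
      if a == b then 1 + repCharA (c :: rest) else repCharA (b :: c :: rest)

def rep_char (message : String) : Int := repCharA message.toList

-- ===== PORT B =====
-- the while loop of Source B: the index pointer advancing by 2 or 1 is the tail of the character list
def repCharBGo : List Char → Int → Int
  | a :: b :: rest, count =>
      if a == b then repCharBGo rest (count + 1) else repCharBGo (b :: rest) count
  | _, count => count

def rep_char_alt (message : String) : Int := repCharBGo message.toList 0

-- ===== PRECONDITION & SPEC =====
-- Pre_ excludes only the empty string, on which Python A raises IndexError (B returns 0 there).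
def Pre_rep_char (message : String) : Prop := message ≠ ""
instance (message : String) : Decidable (Pre_rep_char message) := by unfold Pre_rep_char; infer_instance
def pvWitness_rep_char : String := "aab"

def Spec_rep_char (message : String) (out : Int) : Prop := out = rep_char_alt message
instance (message : String) (out : Int) : Decidable (Spec_rep_char message out) := by unfold Spec_rep_char; infer_instance

-- ===== CLAIM (what is proved, stated in full; the proofs are below) =====
def Claim_equal_rep_char : Prop := ∀ (message : String), Dom_rep_char message → Pre_rep_char message → Spec_rep_char message (rep_char message)

-- ===== LEMMAS AND PROOFS =====
theorem repCharBGo_eq (l : List Char) (c : Int) : repCharBGo l c = c + repCharA l := by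
  fun_induction repCharBGo l c with
  | case1 a b rest count h ih =>
      cases rest with
      | nil => simp [repCharA, h, ih]
      | cons x xs => simp [repCharA, h, ih]; ring
  | case2 a b rest count h ih =>
      cases rest with
      | nil => simp [repCharA, h, ih]
      | cons x xs => simp [repCharA, h, ih]
  | case3 l count h =>
      cases l with
      | nil => simp [repCharA]
      | cons a t =>
        cases t with
        | nil => simp [repCharA]
        | cons b r => exact absurd rfl (h a b r)

-- ===== VERDICT (by name: the statement is the Claim_ definition above) =====
theorem rep_char_spec : Claim_equal_rep_char := by
  intro message _ _
  unfold Spec_rep_char rep_char rep_char_alt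
  simp [repCharBGo_eq]
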